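-- pv_equiv track=rewrite | github.com/Vergil0327/leetcode-history | UnionFind/3887. Incremental Even-Weighted Cycle Queries/solution.py | numberOfEdgesAdded
-- ===== SOURCE A (Python) =====
-- def numberOfEdgesAdded(n: int, edges: list[list[int]]) -> int:
--     parent = list(range(n))
--     # parity[i] is the parity of the path weight from node i to parent[i]
--     parity = [0] * n
--     # rank[i] is the height of the tree rooted at i
--     rank = [1] * n
--
--     def find(i):
--         if parent[i] == i:
--             return i, 0
--
--         # Recursive Path Compression
--         root, root_dist = find(parent[i])
--         parent[i] = root
--         # Update current node's distance to be relative to the new root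
--         parity[i] = (parity[i] + root_dist) % 2
--         return parent[i], parity[i]
--
--     added_count = 0
--
--     for u, v, w in edges:
--         root_u, d_u = find(u)
--         root_v, d_v = find(v)
--
--         if root_u != root_v:
--             # Union by Rank
--             if rank[root_u] < rank[root_v]:
--                 parent[root_u] = root_v # root_v is new root
--                 parity[root_u] = (d_u + d_v + w) % 2 # update parity of root_u to new root
--                 rank[root_v] += rank[root_u]
--             else:
--                 # u becomes the new parent (handles > and == cases)
--                 parent[root_v] = root_u
--                 parity[root_v] = (d_u + d_v + w) % 2
--                 rank[root_u] += rank[root_v]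
--
--             added_count += 1
--         else:
--             # Cycle check: existing path (u->root->v) must match edge weight w
--             if (d_u + d_v) % 2 == w:
--                 added_count += 1
--
--     return added_count
-- ===== SOURCE B (Python) =====
-- def numberOfEdgesAdded(n: int, edges: list[list[int]]) -> int:
--     # Eager-relabel weighted quick-find: label[i] is i's component representative,
--     # par[i] the parity of the path from i to that representative; each union
--     # rewrites the labels of the smaller component, so there are no parent chains.
--     label = list(range(n))
--     par = [0] * n
--     size = [1] * n
--     count = 0
--     for u, v, w in edges:
--         ru, du = label[u], par[u]
--         rv, dv = label[v], par[v]
--         if ru != rv: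
--             if size[ru] < size[rv]:
--                 ru, du, rv, dv = rv, dv, ru, du
--             shift = (du + dv + w) % 2
--             for j in range(n):
--                 if label[j] == rv:
--                     label[j] = ru
--                     par[j] = (par[j] + shift) % 2
--             size[ru] += size[rv]
--             count += 1
--         elif (du + dv) % 2 == w:
--             count += 1
--     return count
-- ===== Notes on version B (the rewrite author's own statement) =====
-- stated objective: simpler
-- what changed: A's union-find forest (recursive find with path compression + union by size over parent/parity arrays) is replaced by an eager-relabel weighted quick-find: every node stores its representative and parity directly, find is two array reads, and each union rewrites the labels/parities of the losing component in one pass over range(n).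
import Mathlib
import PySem

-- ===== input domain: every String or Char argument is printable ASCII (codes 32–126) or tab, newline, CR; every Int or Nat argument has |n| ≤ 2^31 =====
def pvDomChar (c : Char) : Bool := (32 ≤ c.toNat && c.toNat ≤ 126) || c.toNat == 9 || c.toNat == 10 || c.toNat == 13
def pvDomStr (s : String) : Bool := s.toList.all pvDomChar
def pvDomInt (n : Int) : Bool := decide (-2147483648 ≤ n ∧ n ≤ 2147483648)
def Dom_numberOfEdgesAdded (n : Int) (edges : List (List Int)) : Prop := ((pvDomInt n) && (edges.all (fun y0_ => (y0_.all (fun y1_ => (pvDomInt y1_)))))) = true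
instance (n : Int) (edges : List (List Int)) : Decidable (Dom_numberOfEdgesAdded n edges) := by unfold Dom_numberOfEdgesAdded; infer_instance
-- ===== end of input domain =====

-- B replaces A's path-compressed union-by-size forest by an eager-relabel weighted quick-find
-- (labels/parities of the smaller component rewritten on each union; no parent chains, no recursion).
-- Alternative decomposition, not faster; equal return value on all inputs admitted by Pre_.


-- ===== PORT A =====
-- A's recursive `find` with path compression; fuel n+1 always suffices (chains are acyclic,
-- shown in the proofs below), so the port is exact on Pre_.
def findA : Nat → List Int → List Int → Int → List Int × List Int × Int × Int
  | 0, p, q, i => (p, q, i, 0)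
  | fuel+1, p, q, i =>
    if PySem.List.pyGetD p i 0 = i then (p, q, i, 0)
    else
      let r := findA fuel p q (PySem.List.pyGetD p i 0)
      let p1 := PySem.List.pySetD r.1 i r.2.2.1
      let q1 := PySem.List.pySetD r.2.1 i (PySem.Int.mod (PySem.List.pyGetD r.2.1 i 0 + r.2.2.2) 2)
      (p1, q1, PySem.List.pyGetD p1 i 0, PySem.List.pyGetD q1 i 0)

def loopA : List (List Int) → List Int → List Int → List Int → Int → Int
  | [], _, _, _, c => c
  | e :: rest, p, q, rk, c =>
    let u := e.getD 0 0
    let v := e.getD 1 0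
    let w := e.getD 2 0
    let fu := findA (p.length + 1) p q u
    let fv := findA (fu.1.length + 1) fu.1 fu.2.1 v
    let ru := fu.2.2.1
    let du := fu.2.2.2
    let rv := fv.2.2.1
    let dv := fv.2.2.2
    if ru ≠ rv then
      if PySem.List.pyGetD rk ru 0 < PySem.List.pyGetD rk rv 0 then
        loopA rest (PySem.List.pySetD fv.1 ru rv)
          (PySem.List.pySetD fv.2.1 ru (PySem.Int.mod (du + dv + w) 2))
          (PySem.List.pySetD rk rv (PySem.List.pyGetD rk rv 0 + PySem.List.pyGetD rk ru 0)) (c + 1)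
      else
        loopA rest (PySem.List.pySetD fv.1 rv ru)
          (PySem.List.pySetD fv.2.1 rv (PySem.Int.mod (du + dv + w) 2))
          (PySem.List.pySetD rk ru (PySem.List.pyGetD rk ru 0 + PySem.List.pyGetD rk rv 0)) (c + 1)
    else if PySem.Int.mod (du + dv) 2 = w then loopA rest fv.1 fv.2.1 rk (c + 1)
    else loopA rest fv.1 fv.2.1 rk c

def numberOfEdgesAdded (n : Int) (edges : List (List Int)) : Int :=
  loopA edges (PySem.List.pyRange 0 n 1) (List.replicate n.toNat 0) (List.replicate n.toNat 1) 0

-- ===== PORT B =====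
-- B's inner relabel loop body: `if label[j] == rv: label[j] = ru; par[j] = (par[j]+s) % 2`
def relabelStep (ru rv s : Int) (st : List Int × List Int) (j : Int) : List Int × List Int :=
  if PySem.List.pyGetD st.1 j 0 = rv then
    (PySem.List.pySetD st.1 j ru,
     PySem.List.pySetD st.2 j (PySem.Int.mod (PySem.List.pyGetD st.2 j 0 + s) 2))
  else st

def loopB (n : Int) : List (List Int) → List Int → List Int → List Int → Int → Int
  | [], _, _, _, c => c
  | e :: rest, lab, par, sz, c =>
    let u := e.getD 0 0
    let v := e.getD 1 0
    let w := e.getD 2 0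
    let ru := PySem.List.pyGetD lab u 0
    let du := PySem.List.pyGetD par u 0
    let rv := PySem.List.pyGetD lab v 0
    let dv := PySem.List.pyGetD par v 0
    if ru ≠ rv then
      let t := if PySem.List.pyGetD sz ru 0 < PySem.List.pyGetD sz rv 0
               then (rv, dv, ru, du) else (ru, du, rv, dv)
      let s := PySem.Int.mod (t.2.1 + t.2.2.2 + w) 2
      let st := (PySem.List.pyRange 0 n 1).foldl (relabelStep t.1 t.2.2.1 s) (lab, par)
      loopB n rest st.1 st.2
        (PySem.List.pySetD sz t.1 (PySem.List.pyGetD sz t.1 0 + PySem.List.pyGetD sz t.2.2.1 0)) (c + 1)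
    else if PySem.Int.mod (du + dv) 2 = w then loopB n rest lab par sz (c + 1)
    else loopB n rest lab par sz c

def numberOfEdgesAdded_alt (n : Int) (edges : List (List Int)) : Int :=
  loopB n edges (PySem.List.pyRange 0 n 1) (List.replicate n.toNat 0) (List.replicate n.toNat 1) 0

-- ===== PRECONDITION & SPEC =====
-- Pre_ excludes exactly the inputs where A raises: edges that are not 3-element lists
-- (tuple unpacking raises ValueError) and edge endpoints outside [-n, n) (IndexError);
-- negative in-range endpoints follow Python's index wraparound.
def Pre_numberOfEdgesAdded (n : Int) (edges : List (List Int)) : Prop :=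
  ∀ e ∈ edges, e.length = 3 ∧ -n ≤ e.getD 0 0 ∧ e.getD 0 0 < n ∧ -n ≤ e.getD 1 0 ∧ e.getD 1 0 < n
instance (n : Int) (edges : List (List Int)) : Decidable (Pre_numberOfEdgesAdded n edges) := by
  unfold Pre_numberOfEdgesAdded; infer_instance

def pvWitness_numberOfEdgesAdded : Int × List (List Int) :=
  (3, [[0, 1, 1], [1, 2, 0], [0, 2, 1], [0, 2, 0]])

def Spec_numberOfEdgesAdded (n : Int) (edges : List (List Int)) (out : Int) : Prop := out = numberOfEdgesAdded_alt n edges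
instance (n : Int) (edges : List (List Int)) (out : Int) : Decidable (Spec_numberOfEdgesAdded n edges out) := by unfold Spec_numberOfEdgesAdded; infer_instance

-- ===== CLAIM (what is proved, stated in full; the proofs are below) =====
def Claim_equal_numberOfEdgesAdded : Prop := ∀ (n : Int) (edges : List (List Int)), Dom_numberOfEdgesAdded n edges → Pre_numberOfEdgesAdded n edges → Spec_numberOfEdgesAdded n edges (numberOfEdgesAdded n edges)

-- ===== LEMMAS AND PROOFS =====

-- Python index wraparound, as a Nat index (exact for -len ≤ i < len)
def widx (len : Nat) (i : Int) : Nat := (if i < 0 then i + len else i).toNat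

lemma widx_lt (len : Nat) (i : Int) (h1 : -(len:Int) ≤ i) (h2 : i < (len:Int)) :
    widx len i < len := by unfold widx; split <;> omega

lemma widx_natCast (len : Nat) (k : Nat) : widx len (k : Int) = k := by
  unfold widx; split <;> omega

lemma widx_nonneg (len : Nat) (i : Int) (h : 0 ≤ i) : widx len i = i.toNat := by
  unfold widx; split <;> omega

lemma widx_cast (len : Nat) (i : Int) (h1 : -(len:Int) ≤ i) (h2 : 0 ≤ i) :
    ((widx len i : Nat) : Int) = i := by unfold widx; split <;> omega

lemma pyGetD_widx (xs : List Int) (i : Int) (d : Int)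
    (h1 : -(xs.length:Int) ≤ i) (h2 : i < (xs.length:Int)) :
    PySem.List.pyGetD xs i d = xs.getD (widx xs.length i) d := by
  unfold PySem.List.pyGetD PySem.List.pyGet? PySem.List.pyIdx?
  rcases lt_or_ge i 0 with hi | hi
  · have e1 : xs.length - (-i).toNat = widx xs.length i := by unfold widx; split <;> omega
    rw [if_neg (by omega : ¬ 0 ≤ i), if_pos h1, e1]
    simp [List.getD_eq_getElem?_getD]
  · have e1 : i.toNat = widx xs.length i := by unfold widx; split <;> omega
    rw [if_pos hi, if_pos h2, e1]
    simp [List.getD_eq_getElem?_getD]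

lemma pySetD_widx (xs : List Int) (i : Int) (v : Int)
    (h1 : -(xs.length:Int) ≤ i) (h2 : i < (xs.length:Int)) :
    PySem.List.pySetD xs i v = xs.set (widx xs.length i) v := by
  unfold PySem.List.pySetD PySem.List.pySet? PySem.List.pyIdx?
  rcases lt_or_ge i 0 with hi | hi
  · have e1 : xs.length - (-i).toNat = widx xs.length i := by unfold widx; split <;> omega
    rw [if_neg (by omega : ¬ 0 ≤ i), if_pos h1, e1]
    simp
  · have e1 : i.toNat = widx xs.length i := by unfold widx; split <;> omega
    rw [if_pos hi, if_pos h2, e1]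
    simp

lemma getD_set_self (xs : List Int) (m : Nat) (v : Int) (h : m < xs.length) :
    (xs.set m v).getD m 0 = v := by
  simp [List.getD_eq_getElem?_getD, h]

lemma getD_set_ne (xs : List Int) (m k : Nat) (v : Int) (h : m ≠ k) :
    (xs.set m v).getD k 0 = xs.getD k 0 := by
  simp [List.getD_eq_getElem?_getD, List.getElem?_set_ne h]

lemma mod2_lb (a : Int) : 0 ≤ PySem.Int.mod a 2 := PySem.Int.mod_nonneg a (by norm_num)
lemma mod2_ub (a : Int) : PySem.Int.mod a 2 < 2 := PySem.Int.mod_lt a (by norm_num)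
lemma mod2_emod (a : Int) : PySem.Int.mod a 2 = a % 2 :=
  PySem.Int.mod_eq_emod_of_pos (by norm_num)

lemma mod2_add_left (a b : Int) : PySem.Int.mod (PySem.Int.mod a 2 + b) 2 = PySem.Int.mod (a + b) 2 := by
  simp only [mod2_emod]; omega
lemma mod2_add_right (a b : Int) : PySem.Int.mod (a + PySem.Int.mod b 2) 2 = PySem.Int.mod (a + b) 2 := by
  simp only [mod2_emod]; omega
lemma mod2_small (a : Int) (h1 : 0 ≤ a) (h2 : a < 2) : PySem.Int.mod a 2 = a := by
  simp only [mod2_emod]; omega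

-- pure reference semantics of A's parity forest: follow parents to the root, summing parity mod 2
def resolve : Nat → List Int → List Int → Int → Option (Int × Int)
  | 0, _, _, _ => none
  | f+1, p, q, i =>
    if PySem.List.pyGetD p i 0 = i then some (i, 0)
    else match resolve f p q (PySem.List.pyGetD p i 0) with
      | some (r, d) => some (r, PySem.Int.mod (PySem.List.pyGetD q i 0 + d) 2)
      | none => none

def Canon (n : Nat) (xs : List Int) : Prop := ∀ x ∈ xs, 0 ≤ x ∧ x < (n:Int)

def RootZero (n : Nat) (p q : List Int) : Prop :=
  ∀ k, k < n → p.getD k 0 = (k:Int) → q.getD k 0 = 0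

lemma resolve_mono (p q : List Int) :
    ∀ (g h : Nat) (i : Int) (v : Int × Int), g ≤ h →
    resolve g p q i = some v → resolve h p q i = some v := by
  intro g
  induction g with
  | zero => intro h i v _ hg; simp [resolve] at hg
  | succ g ih =>
    intro h i v hle hg
    obtain ⟨h', rfl⟩ : ∃ h', h = h' + 1 := ⟨h - 1, by omega⟩
    rw [resolve] at hg ⊢
    by_cases hguard : PySem.List.pyGetD p i 0 = i
    · rw [if_pos hguard] at hg ⊢; exact hg
    · rw [if_neg hguard] at hg ⊢
      cases hr : resolve g p q (PySem.List.pyGetD p i 0) with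
      | none => rw [hr] at hg; simp at hg
      | some rd =>
        rw [hr] at hg
        rw [ih h' _ rd (by omega) hr]
        exact hg

lemma resolve_det (p q : List Int) (f g : Nat) (i : Int) (v w : Int × Int)
    (hv : resolve f p q i = some v) (hw : resolve g p q i = some w) : v = w := by
  have h1 := resolve_mono p q f (max f g) i v (le_max_left _ _) hv
  have h2 := resolve_mono p q g (max f g) i w (le_max_right _ _) hw
  rw [h1] at h2; injection h2

lemma resolve_out (n : Nat) (p q : List Int) (hl : p.length = n) (hC : Canon n p) :
    ∀ (f : Nat) (i r d : Int), -(n:Int) ≤ i → i < (n:Int) →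
    resolve f p q i = some (r, d) →
    (0 ≤ r ∧ r < (n:Int)) ∧ p.getD r.toNat 0 = r ∧ (0 ≤ d ∧ d < 2) := by
  intro f
  induction f with
  | zero => intro i r d _ _ h; simp [resolve] at h
  | succ f ih =>
    intro i r d h1 h2 h
    have hw : widx n i < n := widx_lt n i h1 h2
    have hget : PySem.List.pyGetD p i 0 = p.getD (widx n i) 0 := by
      rw [pyGetD_widx p i 0 (by rw [hl]; exact h1) (by rw [hl]; exact h2), hl]
    have hmem : p.getD (widx n i) 0 ∈ p := by
      rw [List.getD_eq_getElem _ _ (by omega)]; exact List.getElem_mem _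
    obtain ⟨hpi0, hpilt⟩ := hC _ hmem
    rw [resolve] at h
    by_cases hguard : PySem.List.pyGetD p i 0 = i
    · rw [if_pos hguard] at h
      injection h with h'; injection h' with hr hd
      subst hr; subst hd
      have hi0 : 0 ≤ i := by rw [← hguard]; omega
      refine ⟨⟨hi0, h2⟩, ?_, by omega⟩
      have : widx n i = i.toNat := widx_nonneg n i hi0
      rw [← this, ← hget, hguard]
    · rw [if_neg hguard] at h
      cases hr : resolve f p q (PySem.List.pyGetD p i 0) with
      | none => rw [hr] at h; simp at h
      | some rd =>
        rw [hr] at h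
        obtain ⟨r2, d2⟩ := rd
        obtain ⟨hb, hroot, _⟩ := ih (PySem.List.pyGetD p i 0) r2 d2
          (by rw [hget]; omega) (by rw [hget]; omega) hr
        simp only [Prod.mk.injEq, Option.some.injEq] at h
        obtain ⟨hr2, hd2⟩ := h
        subst hr2; subst hd2
        exact ⟨hb, hroot, mod2_lb _, mod2_ub _⟩

-- a negative index resolves exactly like its wrapped index when the latter is not a root
lemma resolve_wrap_nonroot (n : Nat) (p q : List Int) (hl : p.length = n) (hql : q.length = n) (hC : Canon n p)
    (i : Int) (h1 : -(n:Int) ≤ i) (h2 : i < (n:Int))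
    (hnr : p.getD (widx n i) 0 ≠ ((widx n i : Nat) : Int)) :
    ∀ g, resolve g p q i = resolve g p q ((widx n i : Nat) : Int) := by
  intro g
  cases g with
  | zero => rfl
  | succ g =>
    have hw : widx n i < n := widx_lt n i h1 h2
    have hgp : PySem.List.pyGetD p i 0 = p.getD (widx n i) 0 := by
      rw [pyGetD_widx p i 0 (by rw [hl]; exact h1) (by rw [hl]; exact h2), hl]
    have hgp' : PySem.List.pyGetD p ((widx n i : Nat) : Int) 0 = p.getD (widx n i) 0 := by
      simp [widx_natCast]
    have hgq : PySem.List.pyGetD q i 0 = q.getD (widx n i) 0 := by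
      rw [pyGetD_widx q i 0 (by rw [hql]; exact h1) (by rw [hql]; exact h2), hql]
    have hgq' : PySem.List.pyGetD q ((widx n i : Nat) : Int) 0 = q.getD (widx n i) 0 := by
      simp [widx_natCast]
    have hmem : p.getD (widx n i) 0 ∈ p := by
      rw [List.getD_eq_getElem _ _ (by omega)]; exact List.getElem_mem _
    obtain ⟨hpi0, hpilt⟩ := hC _ hmem
    have hguard1 : ¬ PySem.List.pyGetD p i 0 = i := by
      rcases lt_or_ge i 0 with hi | hi
      · rw [hgp]; omega
      · rw [hgp]; rw [← widx_cast n i h1 hi] at hnr ⊢; exact hnr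
    have hguard2 : ¬ PySem.List.pyGetD p ((widx n i : Nat) : Int) 0 = ((widx n i : Nat) : Int) := by
      rw [hgp']; exact hnr
    rw [resolve, resolve, if_neg hguard1, if_neg hguard2, hgp, hgp', hgq, hgq']

lemma resolve_wrap_succ (n : Nat) (p q : List Int) (hl : p.length = n) (hql : q.length = n)
    (hC : Canon n p) (hz : RootZero n p q)
    (i : Int) (h1 : -(n:Int) ≤ i) (h2 : i < (n:Int))
    (g : Nat) (v : Int × Int) (h : resolve g p q ((widx n i : Nat) : Int) = some v) :
    resolve (g+1) p q i = some v := by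
  rcases le_or_gt 0 i with hi | hi
  · rw [widx_cast n i h1 hi] at h
    exact resolve_mono p q g (g+1) i v (by omega) h
  · by_cases hroot : p.getD (widx n i) 0 = ((widx n i : Nat) : Int)
    · have hw : widx n i < n := widx_lt n i h1 h2
      cases g with
      | zero => simp [resolve] at h
      | succ g =>
        rw [resolve, if_pos (by simpa [widx_natCast] using hroot)] at h
        injection h with h'
        subst h'
        have hgp : PySem.List.pyGetD p i 0 = p.getD (widx n i) 0 := by
          rw [pyGetD_widx p i 0 (by rw [hl]; exact h1) (by rw [hl]; exact h2), hl]
        have hgq : PySem.List.pyGetD q i 0 = q.getD (widx n i) 0 := by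
          rw [pyGetD_widx q i 0 (by rw [hql]; exact h1) (by rw [hql]; exact h2), hql]
        have hguard : ¬ PySem.List.pyGetD p i 0 = i := by rw [hgp]; omega
        rw [resolve, if_neg hguard, hgp, hroot]
        rw [resolve, if_pos (by simpa [widx_natCast] using hroot)]
        rw [hgq, hz (widx n i) hw hroot]
        norm_num [mod2_emod]
    · rw [resolve_wrap_nonroot n p q hl hql hC i h1 h2 hroot (g+1)]
      exact resolve_mono p q g (g+1) _ v (by omega) h

lemma exists_min_fuel (p q : List Int) (i : Int) (g : Nat) (v : Int × Int)
    (h : resolve g p q i = some v) :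
    ∃ f, f ≤ g ∧ resolve f p q i = some v ∧ (∀ h', resolve h' p q i ≠ none → f ≤ h') := by
  classical
  have hP : ∃ f, resolve f p q i ≠ none := ⟨g, by simp [h]⟩
  refine ⟨Nat.find hP, Nat.find_le (by simp [h]), ?_, fun h' hh => Nat.find_le hh⟩
  have hspec := Nat.find_spec hP
  cases hv : resolve (Nat.find hP) p q i with
  | none => exact absurd hv hspec
  | some w => exact congrArg _ (resolve_det p q _ g i w v hv h)

lemma resolve_root_self (n : Nat) (p q : List Int) (hl : p.length = n) (r : Int)
    (hr0 : 0 ≤ r) (hrn : r < (n:Int)) (hroot : p.getD r.toNat 0 = r) (g : Nat) (hg : 1 ≤ g) :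
    resolve g p q r = some (r, 0) := by
  obtain ⟨g', rfl⟩ : ∃ g', g = g' + 1 := ⟨g - 1, by omega⟩
  have hget : PySem.List.pyGetD p r 0 = p.getD r.toNat 0 := by
    rw [pyGetD_widx p r 0 (by omega) (by omega), hl, widx_nonneg n r hr0]
  rw [resolve, if_pos (by rw [hget, hroot])]

-- a "compression" rewrite (every changed node now points directly at its root with its
-- total parity) preserves every resolve value, at the same fuel
lemma compat_preserve (n : Nat) (p q p' q' : List Int)
    (hl : p.length = n) (hl' : p'.length = n) (hC : Canon n p)
    (hpost : ∀ k, k < n →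
      (p'.getD k 0 = p.getD k 0 ∧ q'.getD k 0 = q.getD k 0) ∨
      (p.getD k 0 ≠ (k:Int) ∧ ∃ g, resolve g p q (k:Int) = some (p'.getD k 0, q'.getD k 0))) :
    ∀ (gg : Nat) (k : Nat) (v : Int × Int), k < n →
      resolve gg p q (k:Int) = some v → resolve gg p' q' (k:Int) = some v := by
  intro gg
  induction gg with
  | zero => intro k v _ hg; simp [resolve] at hg
  | succ gg ih =>
    intro k v hk hg
    have hgetp : PySem.List.pyGetD p ((k:Nat):Int) 0 = p.getD k 0 := by simp
    have hgetp' : PySem.List.pyGetD p' ((k:Nat):Int) 0 = p'.getD k 0 := by simp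
    by_cases hroot : p.getD k 0 = (k:Int)
    · have hunch : p'.getD k 0 = p.getD k 0 ∧ q'.getD k 0 = q.getD k 0 := by
        rcases hpost k hk with h | h
        · exact h
        · exact absurd hroot h.1
      rw [resolve, if_pos (by rw [hgetp]; exact hroot)] at hg
      rw [resolve, if_pos (by rw [hgetp', hunch.1]; exact hroot)]
      exact hg
    · rw [resolve, if_neg (by rw [hgetp]; exact hroot)] at hg
      rcases hpost k hk with ⟨e1, e2⟩ | ⟨hnr, g0, hg0⟩
      · -- entry unchanged: recurse
        cases hr : resolve gg p q (PySem.List.pyGetD p ((k:Nat):Int) 0) with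
        | none => rw [hr] at hg; simp at hg
        | some rd =>
          rw [hr] at hg
          obtain ⟨r2, d2⟩ := rd
          have hmem : p.getD k 0 ∈ p := by
            rw [List.getD_eq_getElem _ _ (by omega)]; exact List.getElem_mem _
          obtain ⟨hpi0, hpilt⟩ := hC _ hmem
          have hcast : p.getD k 0 = (((p.getD k 0).toNat : Nat) : Int) := by omega
          have hinner : resolve gg p' q' (((p.getD k 0).toNat : Nat) : Int) = some (r2, d2) := by
            apply ih _ _ (by omega)
            rw [← hcast]; rw [hgetp] at hr; exact hr
          rw [resolve, if_neg (by rw [hgetp', e1]; exact hroot), hgetp', e1, hcast, hinner]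
          have : PySem.List.pyGetD q' ((k:Nat):Int) 0 = PySem.List.pyGetD q ((k:Nat):Int) 0 := by
            simp only [PySem.List.pyGetD_natCast]; exact e2
          rw [this]
          exact hg
      · -- entry rewritten to point at its root
        have hvv : v = (p'.getD k 0, q'.getD k 0) := by
          have h1 : resolve (gg+1) p q (k:Int) = some v := by
            rw [resolve, if_neg (by rw [hgetp]; exact hroot)]; exact hg
          exact resolve_det p q _ g0 _ v _ h1 hg0
        have hout := resolve_out n p q hl hC g0 (k:Int) (p'.getD k 0) (q'.getD k 0)
          (by omega) (by omega) hg0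
        obtain ⟨⟨hr00, hr0n⟩, hr0root, hd00, hd01⟩ := hout
        have hr0root' : p'.getD (p'.getD k 0).toNat 0 = p'.getD k 0 := by
          rcases hpost (p'.getD k 0).toNat (by omega) with h | h
          · rw [h.1]; exact hr0root
          · exact absurd (by rw [hr0root]; omega : p.getD (p'.getD k 0).toNat 0 =
              (((p'.getD k 0).toNat : Nat) : Int)) h.1
        have hne : p'.getD k 0 ≠ (k:Int) := by
          intro he
          have ht : (p'.getD k 0).toNat = k := by omega
          rw [ht] at hr0root
          exact hnr (by rw [hr0root, he])
        have hgg1 : 1 ≤ gg := by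
          by_contra hlt
          have : gg = 0 := by omega
          subst this
          simp [resolve] at hg
        rw [resolve, if_neg (by rw [hgetp']; exact hne), hgetp',
          resolve_root_self n p' q' hl' (p'.getD k 0) hr00 hr0n hr0root' gg hgg1]
        show some (p'.getD k 0, PySem.Int.mod (PySem.List.pyGetD q' ((k:Nat):Int) 0 + 0) 2) = some v
        have hq : PySem.Int.mod (PySem.List.pyGetD q' ((k:Nat):Int) 0 + 0) 2 = q'.getD k 0 := by
          simp only [PySem.List.pyGetD_natCast, add_zero]
          exact mod2_small _ hd00 hd01
        rw [hq, hvv]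

-- correctness of port A's find: it returns the resolve value and performs a compression rewrite
lemma resolve_ne_none_mono (p q : List Int) (g h : Nat) (i : Int) (hle : g ≤ h)
    (hg : resolve g p q i ≠ none) : resolve h p q i ≠ none := by
  cases hs : resolve g p q i with
  | none => exact absurd hs hg
  | some w => rw [resolve_mono p q g h i w hle hs]; simp

lemma findA_ok (n : Nat) :
    ∀ (fuel f : Nat) (p q : List Int) (i r d : Int),
    p.length = n → q.length = n → Canon n p → RootZero n p q →
    -(n:Int) ≤ i → i < (n:Int) →
    resolve f p q i = some (r, d) →
    (∀ g, resolve g p q i ≠ none → f ≤ g) →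
    f ≤ fuel →
    ∃ p' q', findA fuel p q i = (p', q', r, d) ∧ p'.length = n ∧ q'.length = n ∧
      ∀ k, k < n →
        (p'.getD k 0 = p.getD k 0 ∧ q'.getD k 0 = q.getD k 0) ∨
        (p.getD k 0 ≠ (k:Int) ∧ resolve f p q (k:Int) ≠ none ∧
          ∃ g, resolve g p q (k:Int) = some (p'.getD k 0, q'.getD k 0)) := by
  intro fuel
  induction fuel with
  | zero =>
    intro f p q i r d hl hql hC hz h1 h2 hres hmin hf
    have : f = 0 := by omega
    subst this; simp [resolve] at hres
  | succ fuel ih =>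
    intro f p q i r d hl hql hC hz h1 h2 hres hmin hf
    have hw : widx n i < n := widx_lt n i h1 h2
    have hgetp : PySem.List.pyGetD p i 0 = p.getD (widx n i) 0 := by
      rw [pyGetD_widx p i 0 (by rw [hl]; exact h1) (by rw [hl]; exact h2), hl]
    have hgetq : PySem.List.pyGetD q i 0 = q.getD (widx n i) 0 := by
      rw [pyGetD_widx q i 0 (by rw [hql]; exact h1) (by rw [hql]; exact h2), hql]
    have hf1 : 1 ≤ f := by
      by_contra hc
      have : f = 0 := by omega
      subst this; simp [resolve] at hres
    obtain ⟨f', rfl⟩ : ∃ f', f = f' + 1 := ⟨f - 1, by omega⟩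
    by_cases hguard : PySem.List.pyGetD p i 0 = i
    · rw [resolve, if_pos hguard] at hres
      simp only [Option.some.injEq, Prod.mk.injEq] at hres
      obtain ⟨hri, hdi⟩ := hres
      refine ⟨p, q, ?_, hl, hql, fun k hk => Or.inl ⟨rfl, rfl⟩⟩
      rw [findA, if_pos hguard, hri, hdi]
    · rw [resolve, if_neg hguard] at hres
      cases hr : resolve f' p q (PySem.List.pyGetD p i 0) with
      | none => rw [hr] at hres; simp at hres
      | some rd =>
        obtain ⟨r2, d2⟩ := rd
        rw [hr] at hres
        simp only [Option.some.injEq, Prod.mk.injEq] at hres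
        obtain ⟨hr2, hd2⟩ := hres
        rw [hr2] at hr
        have hresfull : resolve (f'+1) p q i = some (r, d) := by
          rw [resolve, if_neg hguard, hr]
          show some (r, PySem.Int.mod (PySem.List.pyGetD q i 0 + d2) 2) = some (r, d)
          rw [hd2]
        have hmemppi : p.getD (widx n i) 0 ∈ p := by
          rw [List.getD_eq_getElem _ _ (by omega)]; exact List.getElem_mem _
        obtain ⟨hpi0, hpin⟩ := hC _ hmemppi
        have hminpi : ∀ g, resolve g p q (PySem.List.pyGetD p i 0) ≠ none → f' ≤ g := by
          intro g hgnn
          cases hsome : resolve g p q (PySem.List.pyGetD p i 0) with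
          | none => exact absurd hsome hgnn
          | some w =>
            obtain ⟨w1, w2⟩ := w
            have hstep : resolve (g+1) p q i =
                some (w1, PySem.Int.mod (PySem.List.pyGetD q i 0 + w2) 2) := by
              rw [resolve, if_neg hguard, hsome]
            have := hmin (g+1) (by rw [hstep]; simp)
            omega
        obtain ⟨p1, q1, hfind1, hlp1, hlq1, hpost1⟩ :=
          ih f' p q (PySem.List.pyGetD p i 0) r d2 hl hql hC hz
            (by rw [hgetp]; omega) (by rw [hgetp]; exact hpin) hr hminpi (by omega)
        have hunch : p1.getD (widx n i) 0 = p.getD (widx n i) 0 ∧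
            q1.getD (widx n i) 0 = q.getD (widx n i) 0 := by
          rcases hpost1 (widx n i) hw with h | ⟨hnr, hnn, _⟩
          · exact h
          · exfalso
            have hwr := resolve_wrap_nonroot n p q hl hql hC i h1 h2 hnr f'
            have := hmin f' (by rw [hwr]; exact hnn)
            omega
        have hlen1 : -((p1.length:Int)) ≤ i ∧ i < (p1.length:Int) := by rw [hlp1]; exact ⟨h1, h2⟩
        have hlen1q : -((q1.length:Int)) ≤ i ∧ i < (q1.length:Int) := by rw [hlq1]; exact ⟨h1, h2⟩
        have hwp1 : widx p1.length i = widx n i := by rw [hlp1]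
        have hwq1 : widx q1.length i = widx n i := by rw [hlq1]
        have hP' : PySem.List.pySetD p1 i r = p1.set (widx n i) r := by
          rw [pySetD_widx p1 i r hlen1.1 hlen1.2, hwp1]
        have hq1read : PySem.List.pyGetD q1 i 0 = q.getD (widx n i) 0 := by
          rw [pyGetD_widx q1 i 0 hlen1q.1 hlen1q.2, hwq1, hunch.2]
        have hQ' : PySem.List.pySetD q1 i (PySem.Int.mod (PySem.List.pyGetD q1 i 0 + d2) 2) =
            q1.set (widx n i) d := by
          rw [pySetD_widx q1 i _ hlen1q.1 hlen1q.2, hwq1, hq1read, ← hgetq, hd2]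
        have hfind : findA (fuel+1) p q i =
            (p1.set (widx n i) r, q1.set (widx n i) d,
             PySem.List.pyGetD (p1.set (widx n i) r) i 0,
             PySem.List.pyGetD (q1.set (widx n i) d) i 0) := by
          rw [findA, if_neg hguard, hfind1]
          simp only [hP', hQ']
        have hlsetp : (p1.set (widx n i) r).length = n := by simp [hlp1]
        have hlsetq : (q1.set (widx n i) d).length = n := by simp [hlq1]
        have hPread : PySem.List.pyGetD (p1.set (widx n i) r) i 0 = r := by
          rw [pyGetD_widx _ i 0 (by rw [hlsetp]; exact h1) (by rw [hlsetp]; exact h2), hlsetp]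
          exact getD_set_self p1 (widx n i) r (by omega)
        have hQread : PySem.List.pyGetD (q1.set (widx n i) d) i 0 = d := by
          rw [pyGetD_widx _ i 0 (by rw [hlsetq]; exact h1) (by rw [hlsetq]; exact h2), hlsetq]
          exact getD_set_self q1 (widx n i) d (by omega)
        refine ⟨p1.set (widx n i) r, q1.set (widx n i) d, by rw [hfind, hPread, hQread],
          hlsetp, hlsetq, ?_⟩
        intro k hk
        by_cases hki : k = widx n i
        · subst hki
          by_cases hri : p.getD (widx n i) 0 = ((widx n i : Nat) : Int)
          · -- the wrapped index is a root (possible only for negative i): the write is a no-op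
            left
            have hpi : PySem.List.pyGetD p i 0 = ((widx n i : Nat) : Int) := by
              rw [hgetp]; exact hri
            have hchild : resolve f' p q (PySem.List.pyGetD p i 0) =
                some (((widx n i : Nat) : Int), 0) := by
              rw [hpi]
              exact resolve_root_self n p q hl _ (by omega) (by exact_mod_cast hw)
                (by rw [Int.toNat_natCast]; exact hri) f'
                (by
                  by_contra hc
                  have : f' = 0 := by omega
                  subst this; rw [hpi] at hr; simp [resolve] at hr)
            rw [hr] at hchild
            simp only [Option.some.injEq, Prod.mk.injEq] at hchild
            obtain ⟨hrc, hdc⟩ := hchild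
            constructor
            · rw [getD_set_self p1 (widx n i) r (by omega), hrc]
              exact hri.symm
            · rw [getD_set_self q1 (widx n i) d (by omega), ← hd2, hgetq, hdc,
                hz (widx n i) hw hri]
              norm_num [mod2_emod]
          · right
            have hwr := resolve_wrap_nonroot n p q hl hql hC i h1 h2 hri (f'+1)
            refine ⟨hri, ?_, f'+1, ?_⟩
            · rw [← hwr, hresfull]; simp
            · rw [← hwr, hresfull, getD_set_self p1 (widx n i) r (by omega),
                getD_set_self q1 (widx n i) d (by omega)]
        · have hep : (p1.set (widx n i) r).getD k 0 = p1.getD k 0 :=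
            getD_set_ne p1 (widx n i) k r (fun he => hki he.symm)
          have heq : (q1.set (widx n i) d).getD k 0 = q1.getD k 0 :=
            getD_set_ne q1 (widx n i) k d (fun he => hki he.symm)
          rw [hep, heq]
          rcases hpost1 k hk with h | ⟨hnr, hnn, g, hg⟩
          · exact Or.inl h
          · exact Or.inr ⟨hnr, resolve_ne_none_mono p q f' (f'+1) _ (by omega) hnn, g, hg⟩

-- effect of redirecting a root L to a root W on resolve values
lemma resolve_union_other (n : Nat) (p q : List Int) (W L s : Int)
    (hl : p.length = n) (hql : q.length = n) (hC : Canon n p)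
    (hWn : 0 ≤ W ∧ W < (n:Int)) (hLn : 0 ≤ L ∧ L < (n:Int))
    (hWr : p.getD W.toNat 0 = W) (hLr : p.getD L.toNat 0 = L) (hne : W ≠ L) :
    ∀ (g : Nat) (k : Nat) (r d : Int), k < n →
      resolve g p q (k:Int) = some (r, d) → r ≠ L →
      resolve g (p.set L.toNat W) (q.set L.toNat s) (k:Int) = some (r, d) := by
  intro g
  induction g with
  | zero => intro k r d hk h _; simp [resolve] at h
  | succ g ih =>
    intro k r d hk h hrL
    have hLcast : ((L.toNat : Nat) : Int) = L := by omega
    by_cases hroot : p.getD k 0 = (k:Int)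
    · rw [resolve, if_pos (by simpa using hroot)] at h
      simp only [Option.some.injEq, Prod.mk.injEq] at h
      obtain ⟨hrk, hdk⟩ := h
      have hkL : k ≠ L.toNat := by
        intro he; apply hrL; rw [← hrk]; omega
      have hguard3 : PySem.List.pyGetD (p.set L.toNat W) ((k:Nat):Int) 0 = ((k:Nat):Int) := by
        simp only [PySem.List.pyGetD_natCast]
        rw [getD_set_ne p L.toNat k W (fun he => hkL he.symm)]
        exact hroot
      rw [resolve, if_pos hguard3, hrk, hdk]
    · have hkL : k ≠ L.toNat := by
        intro he; subst he; rw [hLr] at hroot; exact hroot (by omega)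
      have hep : (p.set L.toNat W).getD k 0 = p.getD k 0 :=
        getD_set_ne p L.toNat k W (fun he => hkL he.symm)
      have heq : (q.set L.toNat s).getD k 0 = q.getD k 0 :=
        getD_set_ne q L.toNat k s (fun he => hkL he.symm)
      rw [resolve, if_neg (by simpa using hroot)] at h
      cases hr : resolve g p q (PySem.List.pyGetD p ((k:Nat):Int) 0) with
      | none => rw [hr] at h; simp at h
      | some rd =>
        obtain ⟨r2, d2⟩ := rd
        rw [hr] at h
        simp only [Option.some.injEq, Prod.mk.injEq] at h
        obtain ⟨hrk, hdk⟩ := h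
        subst hrk
        have hmem : p.getD k 0 ∈ p := by
          rw [List.getD_eq_getElem _ _ (by omega)]; exact List.getElem_mem _
        obtain ⟨hpi0, hpin⟩ := hC _ hmem
        have hcast : p.getD k 0 = (((p.getD k 0).toNat : Nat) : Int) := by omega
        have hinner := ih (p.getD k 0).toNat r2 d2 (by omega)
          (by rw [← hcast]; simpa using hr) hrL
        rw [resolve, if_neg (by simp only [PySem.List.pyGetD_natCast]; rw [hep]; exact hroot)]
        simp only [PySem.List.pyGetD_natCast, hep, heq]
        rw [hcast, hinner, ← hdk]
        simp

lemma resolve_union_moved (n : Nat) (p q : List Int) (W L s : Int)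
    (hl : p.length = n) (hql : q.length = n) (hC : Canon n p)
    (hWn : 0 ≤ W ∧ W < (n:Int)) (hLn : 0 ≤ L ∧ L < (n:Int))
    (hWr : p.getD W.toNat 0 = W) (hLr : p.getD L.toNat 0 = L) (hne : W ≠ L)
    (hs : 0 ≤ s ∧ s < 2) :
    ∀ (g : Nat) (k : Nat) (d : Int), k < n →
      resolve g p q (k:Int) = some (L, d) →
      resolve (g+1) (p.set L.toNat W) (q.set L.toNat s) (k:Int) = some (W, PySem.Int.mod (d + s) 2) := by
  intro g
  induction g with
  | zero => intro k d hk h; simp [resolve] at h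
  | succ g ih =>
    intro k d hk h
    have hLcast : ((L.toNat : Nat) : Int) = L := by omega
    have hWcast : ((W.toNat : Nat) : Int) = W := by omega
    have hg1 : 1 ≤ g + 1 := by omega
    by_cases hroot : p.getD k 0 = (k:Int)
    · -- k is the root L itself
      rw [resolve, if_pos (by simpa using hroot)] at h
      simp only [Option.some.injEq, Prod.mk.injEq] at h
      obtain ⟨hrk, hdk⟩ := h
      have hkL : k = L.toNat := by omega
      subst hkL
      subst hdk
      have hWroot : (p.set L.toNat W).getD W.toNat 0 = W := by
        rw [getD_set_ne p L.toNat W.toNat W (by omega)]; exact hWr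
      rw [resolve, if_neg (by
        simp only [PySem.List.pyGetD_natCast]
        rw [getD_set_self p L.toNat W (by omega), hLcast]
        omega)]
      rw [show PySem.List.pyGetD (p.set L.toNat W) ((L.toNat:Nat):Int) 0 = W by
        simp only [PySem.List.pyGetD_natCast]; exact getD_set_self p L.toNat W (by omega)]
      rw [resolve_root_self n (p.set L.toNat W) (q.set L.toNat s) (by simp [hl]) W
        (by omega) (by omega) hWroot (g+1) hg1]
      show some (W, PySem.Int.mod (PySem.List.pyGetD (q.set L.toNat s) ((L.toNat:Nat):Int) 0 + 0) 2) = _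
      rw [show PySem.List.pyGetD (q.set L.toNat s) ((L.toNat:Nat):Int) 0 = s by
        simp only [PySem.List.pyGetD_natCast]; exact getD_set_self q L.toNat s (by omega)]
      rw [mod2_small (s + 0) (by omega) (by omega), mod2_small (0 + s) (by omega) (by omega)]
      norm_num
    · have hkL : k ≠ L.toNat := by
        intro he; subst he; rw [hLr] at hroot; exact hroot (by omega)
      have hep : (p.set L.toNat W).getD k 0 = p.getD k 0 :=
        getD_set_ne p L.toNat k W (fun he => hkL he.symm)
      have heq : (q.set L.toNat s).getD k 0 = q.getD k 0 :=
        getD_set_ne q L.toNat k s (fun he => hkL he.symm)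
      rw [resolve, if_neg (by simpa using hroot)] at h
      cases hr : resolve g p q (PySem.List.pyGetD p ((k:Nat):Int) 0) with
      | none => rw [hr] at h; simp at h
      | some rd =>
        obtain ⟨r2, d2⟩ := rd
        rw [hr] at h
        simp only [Option.some.injEq, Prod.mk.injEq] at h
        obtain ⟨hrk, hdk⟩ := h
        subst hrk
        have hmem : p.getD k 0 ∈ p := by
          rw [List.getD_eq_getElem _ _ (by omega)]; exact List.getElem_mem _
        obtain ⟨hpi0, hpin⟩ := hC _ hmem
        have hcast : p.getD k 0 = (((p.getD k 0).toNat : Nat) : Int) := by omega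
        have hinner := ih (p.getD k 0).toNat d2 (by omega)
          (by rw [← hcast]; simpa using hr)
        rw [resolve, if_neg (by simp only [PySem.List.pyGetD_natCast]; rw [hep]; exact hroot)]
        simp only [PySem.List.pyGetD_natCast, hep, heq]
        rw [hcast, hinner]
        show some (W, PySem.Int.mod (q.getD k 0 + PySem.Int.mod (d2 + s) 2) 2) = _
        rw [← hdk, mod2_add_right, mod2_add_left]
        simp only [PySem.List.pyGetD_natCast, mod2_emod, Option.some.injEq, Prod.mk.injEq]
        exact ⟨trivial, by omega⟩

-- the invariant tying A's forest state to B's label/parity state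
def InvAB (n : Int) (p q rk lab par sz : List Int) : Prop :=
  p.length = n.toNat ∧ q.length = n.toNat ∧ lab.length = n.toNat ∧ par.length = n.toNat ∧
  rk = sz ∧ Canon n.toNat p ∧ RootZero n.toNat p q ∧
  ∀ k, k < n.toNat → ∃ g, g ≤ lab.countP (fun x => x == lab.getD k 0) ∧
    resolve g p q (k:Int) = some (lab.getD k 0, par.getD k 0)

-- pointwise effect of B's relabel loop
lemma relabel_go (W L s : Int) (nn : Nat) :
    ∀ (a : Int) (st : List Int × List Int), 0 ≤ a →
    st.1.length = nn → st.2.length = nn →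
    (((PySem.List.pyRange a nn 1).foldl (relabelStep W L s) st).1.length = nn ∧
     ((PySem.List.pyRange a nn 1).foldl (relabelStep W L s) st).2.length = nn) ∧
    ∀ k, k < nn →
      (a ≤ (k:Int) →
        (((PySem.List.pyRange a nn 1).foldl (relabelStep W L s) st).1.getD k 0 =
            (if st.1.getD k 0 = L then W else st.1.getD k 0) ∧
         ((PySem.List.pyRange a nn 1).foldl (relabelStep W L s) st).2.getD k 0 =
            (if st.1.getD k 0 = L then PySem.Int.mod (st.2.getD k 0 + s) 2 else st.2.getD k 0))) ∧
      ((k:Int) < a →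
        (((PySem.List.pyRange a nn 1).foldl (relabelStep W L s) st).1.getD k 0 = st.1.getD k 0 ∧
         ((PySem.List.pyRange a nn 1).foldl (relabelStep W L s) st).2.getD k 0 = st.2.getD k 0)) := by
  suffices H : ∀ (m : Nat) (a : Int) (st : List Int × List Int), (nn:Int) - a ≤ m → 0 ≤ a →
      st.1.length = nn → st.2.length = nn →
      (((PySem.List.pyRange a nn 1).foldl (relabelStep W L s) st).1.length = nn ∧
       ((PySem.List.pyRange a nn 1).foldl (relabelStep W L s) st).2.length = nn) ∧
      ∀ k, k < nn →
        (a ≤ (k:Int) →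
          (((PySem.List.pyRange a nn 1).foldl (relabelStep W L s) st).1.getD k 0 =
              (if st.1.getD k 0 = L then W else st.1.getD k 0) ∧
           ((PySem.List.pyRange a nn 1).foldl (relabelStep W L s) st).2.getD k 0 =
              (if st.1.getD k 0 = L then PySem.Int.mod (st.2.getD k 0 + s) 2 else st.2.getD k 0))) ∧
        ((k:Int) < a →
          (((PySem.List.pyRange a nn 1).foldl (relabelStep W L s) st).1.getD k 0 = st.1.getD k 0 ∧
           ((PySem.List.pyRange a nn 1).foldl (relabelStep W L s) st).2.getD k 0 = st.2.getD k 0)) by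
    intro a st ha h1 h2
    exact H nn a st (by omega) ha h1 h2
  intro m
  induction m with
  | zero =>
    intro a st hm ha h1 h2
    rw [PySem.List.pyRange_one_eq_nil (by omega)]
    refine ⟨⟨h1, h2⟩, fun k hk => ⟨fun hak => absurd hak (by omega), fun _ => ⟨rfl, rfl⟩⟩⟩
  | succ m ih =>
    intro a st hm ha h1 h2
    by_cases hend : (nn:Int) ≤ a
    · rw [PySem.List.pyRange_one_eq_nil hend]
      refine ⟨⟨h1, h2⟩, fun k hk => ⟨fun hak => absurd hak (by omega), fun _ => ⟨rfl, rfl⟩⟩⟩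
    · rw [PySem.List.pyRange_one_cons (by omega), List.foldl_cons]
      have hwa : widx nn a = a.toNat := widx_nonneg nn a ha
      have hga : PySem.List.pyGetD st.1 a 0 = st.1.getD a.toNat 0 := by
        rw [pyGetD_widx st.1 a 0 (by omega) (by omega), h1, hwa]
      have hga2 : PySem.List.pyGetD st.2 a 0 = st.2.getD a.toNat 0 := by
        rw [pyGetD_widx st.2 a 0 (by omega) (by omega), h2, hwa]
      have hsa : PySem.List.pySetD st.1 a W = st.1.set a.toNat W := by
        rw [pySetD_widx st.1 a W (by omega) (by omega), h1, hwa]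
      have hsa2 : PySem.List.pySetD st.2 a
          (PySem.Int.mod (PySem.List.pyGetD st.2 a 0 + s) 2) =
          st.2.set a.toNat (PySem.Int.mod (st.2.getD a.toNat 0 + s) 2) := by
        rw [pySetD_widx st.2 a _ (by omega) (by omega), h2, hwa, hga2]
      have hstep : (relabelStep W L s st a).1.length = nn ∧
          (relabelStep W L s st a).2.length = nn := by
        unfold relabelStep
        split <;> simp [hsa, hsa2, h1, h2]
      obtain ⟨⟨hl1, hl2⟩, hptw⟩ := ih (a+1) (relabelStep W L s st a) (by omega) (by omega)
        hstep.1 hstep.2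
      refine ⟨⟨hl1, hl2⟩, fun k hk => ⟨?_, ?_⟩⟩
      · intro hak
        by_cases hka : (k:Int) = a
        · -- processed at this step, untouched afterwards
          have hka' : k = a.toNat := by omega
          obtain ⟨e1, e2⟩ := (hptw k hk).2 (by omega)
          rw [e1, e2]
          subst hka'
          unfold relabelStep
          by_cases hcond : PySem.List.pyGetD st.1 a 0 = L
          · rw [if_pos hcond]
            rw [hga] at hcond
            rw [if_pos hcond, if_pos hcond]
            constructor
            · show (PySem.List.pySetD st.1 a W).getD a.toNat 0 = W
              rw [hsa]; exact getD_set_self st.1 a.toNat W (by omega)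
            · show (PySem.List.pySetD st.2 a _).getD a.toNat 0 = _
              rw [hsa2]; exact getD_set_self st.2 a.toNat _ (by omega)
          · rw [if_neg hcond]
            rw [hga] at hcond
            rw [if_neg hcond, if_neg hcond]
            exact ⟨rfl, rfl⟩
        · -- processed later
          obtain ⟨e1, e2⟩ := (hptw k hk).1 (by omega)
          rw [e1, e2]
          have hne1 : (relabelStep W L s st a).1.getD k 0 = st.1.getD k 0 := by
            unfold relabelStep
            split
            · simp only [hsa]; exact getD_set_ne st.1 a.toNat k W (by omega)
            · rfl
          have hne2 : (relabelStep W L s st a).2.getD k 0 = st.2.getD k 0 := by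
            unfold relabelStep
            split
            · simp only [hsa2]; exact getD_set_ne st.2 a.toNat k _ (by omega)
            · rfl
          rw [hne1, hne2]
          exact ⟨rfl, rfl⟩
      · intro hak
        obtain ⟨e1, e2⟩ := (hptw k hk).2 (by omega)
        rw [e1, e2]
        have hne1 : (relabelStep W L s st a).1.getD k 0 = st.1.getD k 0 := by
          unfold relabelStep
          split
          · simp only [hsa]; exact getD_set_ne st.1 a.toNat k W (by omega)
          · rfl
        have hne2 : (relabelStep W L s st a).2.getD k 0 = st.2.getD k 0 := by
          unfold relabelStep
          split
          · simp only [hsa2]; exact getD_set_ne st.2 a.toNat k _ (by omega)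
          · rfl
        rw [hne1, hne2]
        exact ⟨rfl, rfl⟩

lemma countP_or_split (W L : Int) (hne : W ≠ L) (lab : List Int) :
    (lab.map (fun x => if x = L then W else x)).countP (fun x => x == W) =
      lab.countP (fun x => x == W) + lab.countP (fun x => x == L) := by
  induction lab with
  | nil => simp
  | cons x xs ih =>
    simp only [List.map_cons, List.countP_cons, ih]
    by_cases hx : x = L
    · subst hx
      simp [beq_iff_eq, hne.symm]
      omega
    · by_cases hxw : x = W
      · subst hxw
        simp [beq_iff_eq, hne, hx]
        omega
      · simp [beq_iff_eq, hx, hxw]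

lemma countP_map_ge (L W r : Int) (hr : r ≠ L) (lab : List Int) :
    lab.countP (fun x => x == r) ≤
      (lab.map (fun x => if x = L then W else x)).countP (fun x => x == r) := by
  rw [List.countP_map]
  apply List.countP_mono_left
  intro x _ hxr
  simp only [beq_iff_eq] at hxr
  subst hxr
  simp only [Function.comp_apply, if_neg hr, beq_self_eq_true]

-- one find call preserves the invariant and returns B's stored label/parity
lemma find_step (n : Int) (p q rk lab par sz : List Int) (u : Int)
    (hInv : InvAB n p q rk lab par sz) (hu1 : -n ≤ u) (hu2 : u < n) :
    ∃ p' q', findA (p.length + 1) p q u =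
        (p', q', lab.getD (widx n.toNat u) 0, par.getD (widx n.toNat u) 0) ∧
      InvAB n p' q' rk lab par sz := by
  obtain ⟨hlp, hlq, hllab, hlpar, hrksz, hC, hz, hresI⟩ := hInv
  have hn0 : 0 < n := by omega
  have hcast : ((n.toNat : Nat) : Int) = n := by omega
  have hu1' : -((n.toNat : Nat) : Int) ≤ u := by omega
  have hu2' : u < ((n.toNat : Nat) : Int) := by omega
  have hw : widx n.toNat u < n.toNat := widx_lt n.toNat u hu1' hu2'
  obtain ⟨g, hgle, hgres⟩ := hresI (widx n.toNat u) hw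
  have hwrap := resolve_wrap_succ n.toNat p q hlp hlq hC hz u hu1' hu2' g _ hgres
  obtain ⟨f, hfle, hfres, hfmin⟩ := exists_min_fuel p q u (g+1) _ hwrap
  have hcnt : (lab.countP (fun x => x == lab.getD (widx n.toNat u) 0)) ≤ lab.length :=
    List.countP_le_length
  have hgbound : g ≤ n.toNat := by rw [hllab] at hcnt; omega
  obtain ⟨p', q', hfind, hlp', hlq', hpost⟩ :=
    findA_ok n.toNat (p.length + 1) f p q u (lab.getD (widx n.toNat u) 0)
      (par.getD (widx n.toNat u) 0) hlp hlq hC hz hu1' hu2' hfres hfmin (by omega)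
  refine ⟨p', q', hfind, hlp', hlq', hllab, hlpar, hrksz, ?_, ?_, ?_⟩
  · -- Canon
    intro x hx
    obtain ⟨j, hj, rfl⟩ := List.mem_iff_getElem.mp hx
    have hx' : p'[j] = p'.getD j 0 := by rw [List.getD_eq_getElem _ _ hj]
    rw [hx']
    rcases hpost j (by omega) with ⟨e1, _⟩ | ⟨_, _, g0, hg0⟩
    · rw [e1]
      have : p.getD j 0 ∈ p := by
        rw [List.getD_eq_getElem _ _ (by omega)]; exact List.getElem_mem _
      exact hC _ this
    · exact (resolve_out n.toNat p q hlp hC g0 (j:Int) _ _ (by omega) (by omega) hg0).1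
  · -- RootZero
    intro k hk hroot'
    rcases hpost k hk with ⟨e1, e2⟩ | ⟨hnr, _, g0, hg0⟩
    · rw [e2]; exact hz k hk (by rw [← e1]; exact hroot')
    · exfalso
      have hout := resolve_out n.toNat p q hlp hC g0 (k:Int) _ _ (by omega) (by omega) hg0
      have : (p'.getD k 0).toNat = k := by rw [hroot']; omega
      rw [this, hroot'] at hout
      exact hnr hout.2.1
  · -- resolve values preserved
    intro k hk
    obtain ⟨g2, hle2, hres2⟩ := hresI k hk
    refine ⟨g2, hle2, ?_⟩
    apply compat_preserve n.toNat p q p' q' hlp hlp' hC ?_ g2 k _ hk hres2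
    intro k' hk'
    rcases hpost k' hk' with h | ⟨a, _, c⟩
    · exact Or.inl h
    · exact Or.inr ⟨a, c⟩

-- a union step preserves the invariant
lemma inv_union (n : Int) (p q rk lab par sz rk2 sz2 : List Int) (W L s : Int)
    (hInv : InvAB n p q rk lab par sz)
    (hWn : 0 ≤ W ∧ W < (n.toNat:Int)) (hLn : 0 ≤ L ∧ L < (n.toNat:Int))
    (hWr : p.getD W.toNat 0 = W) (hLr : p.getD L.toNat 0 = L) (hne : W ≠ L)
    (hs : 0 ≤ s ∧ s < 2)
    (hWocc : ∃ kk, kk < n.toNat ∧ lab.getD kk 0 = W)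
    (hrk2 : rk2 = sz2) :
    InvAB n (p.set L.toNat W) (q.set L.toNat s) rk2
      ((PySem.List.pyRange 0 n 1).foldl (relabelStep W L s) (lab, par)).1
      ((PySem.List.pyRange 0 n 1).foldl (relabelStep W L s) (lab, par)).2 sz2 := by
  obtain ⟨hlp, hlq, hllab, hlpar, hrksz, hC, hz, hresI⟩ := hInv
  have hn0 : 0 < n.toNat := by omega
  have hcast : ((n.toNat : Nat) : Int) = n := by omega
  have hpr : PySem.List.pyRange 0 n 1 = PySem.List.pyRange 0 ((n.toNat : Nat) : Int) 1 := by
    rw [hcast]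
  rw [hpr]
  obtain ⟨⟨hl1, hl2⟩, hptw⟩ := relabel_go W L s n.toNat 0 (lab, par) (le_refl 0) hllab hlpar
  have hget1 : ∀ k, k < n.toNat →
      ((PySem.List.pyRange 0 (n.toNat:Int) 1).foldl (relabelStep W L s) (lab, par)).1.getD k 0 =
        (if lab.getD k 0 = L then W else lab.getD k 0) := by
    intro k hk; exact ((hptw k hk).1 (by omega)).1
  have hget2 : ∀ k, k < n.toNat →
      ((PySem.List.pyRange 0 (n.toNat:Int) 1).foldl (relabelStep W L s) (lab, par)).2.getD k 0 =
        (if lab.getD k 0 = L then PySem.Int.mod (par.getD k 0 + s) 2 else par.getD k 0) := by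
    intro k hk; exact ((hptw k hk).1 (by omega)).2
  have hmap : ((PySem.List.pyRange 0 (n.toNat:Int) 1).foldl (relabelStep W L s) (lab, par)).1 =
      lab.map (fun x => if x = L then W else x) := by
    apply List.ext_getElem (by rw [hl1, List.length_map, hllab])
    intro j hj1 hj2
    have hjlab : j < lab.length := by simpa using hj2
    have e1 : _ = _ := hget1 j (by omega)
    rw [List.getD_eq_getElem _ _ hj1] at e1
    rw [e1, List.getElem_map, show lab.getD j 0 = lab[j] from List.getD_eq_getElem _ _ hjlab]
  refine ⟨by simp [hlp], by simp [hlq], hl1, hl2, hrk2, ?_, ?_, ?_⟩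
  · -- Canon
    intro x hx
    rcases List.mem_or_eq_of_mem_set hx with hx' | hx'
    · exact hC _ hx'
    · subst hx'; omega
  · -- RootZero
    intro k hk hroot'
    by_cases hkL : k = L.toNat
    · exfalso
      subst hkL
      rw [getD_set_self p L.toNat W (by omega)] at hroot'
      omega
    · rw [getD_set_ne p L.toNat k W (fun he => hkL he.symm)] at hroot'
      rw [getD_set_ne q L.toNat k s (fun he => hkL he.symm)]
      exact hz k hk hroot'
  · -- resolve values
    intro k hk
    obtain ⟨g, hgle, hgres⟩ := hresI k hk
    rw [hget1 k hk, hget2 k hk]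
    by_cases hcase : lab.getD k 0 = L
    · rw [hcase] at hgres
      rw [if_pos hcase, if_pos hcase]
      refine ⟨g + 1, ?_, resolve_union_moved n.toNat p q W L s hlp hlq hC hWn hLn hWr hLr hne
        hs g k _ hk hgres⟩
      -- fuel bound: new component size = size(W) + size(L)
      rw [hmap, countP_or_split W L hne lab]
      obtain ⟨kk, hkk, hkkW⟩ := hWocc
      have hposW : 0 < lab.countP (fun x => x == W) := by
        rw [List.countP_pos_iff]
        refine ⟨lab.getD kk 0, ?_, ?_⟩
        · rw [List.getD_eq_getElem _ _ (by omega)]; exact List.getElem_mem _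
        · simp only [hkkW, beq_self_eq_true]
      rw [hcase] at hgle
      omega
    · rw [if_neg hcase, if_neg hcase]
      refine ⟨g, ?_, resolve_union_other n.toNat p q W L s hlp hlq hC hWn hLn hWr hLr hne
        g k _ _ hk hgres hcase⟩
      rw [hmap]
      exact le_trans hgle (countP_map_ge L W _ hcase lab)

lemma loop_eq (n : Int) :
    ∀ (edges : List (List Int)) (p q rk lab par sz : List Int) (c : Int),
    InvAB n p q rk lab par sz →
    (∀ e ∈ edges, e.length = 3 ∧ -n ≤ e.getD 0 0 ∧ e.getD 0 0 < n ∧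
      -n ≤ e.getD 1 0 ∧ e.getD 1 0 < n) →
    loopA edges p q rk c = loopB n edges lab par sz c := by
  intro edges
  induction edges with
  | nil => intro p q rk lab par sz c _ _; rfl
  | cons e rest ih =>
    intro p q rk lab par sz c hInv hpre
    obtain ⟨he3, hu1, hu2, hv1, hv2⟩ := hpre e List.mem_cons_self
    have hpre2 : ∀ e' ∈ rest, e'.length = 3 ∧ -n ≤ e'.getD 0 0 ∧ e'.getD 0 0 < n ∧
        -n ≤ e'.getD 1 0 ∧ e'.getD 1 0 < n := fun e' he' => hpre e' (List.mem_cons_of_mem _ he')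
    have hn0 : 0 < n := by omega
    have hcast : ((n.toNat : Nat) : Int) = n := by omega
    obtain ⟨p1, q1, hf1, hInv1⟩ := find_step n p q rk lab par sz (e.getD 0 0) hInv hu1 hu2
    obtain ⟨p2, q2, hf2, hInv2⟩ := find_step n p1 q1 rk lab par sz (e.getD 1 0) hInv1 hv1 hv2
    have hInv2' := hInv2
    obtain ⟨hlp2, hlq2, hllab, hlpar, hrksz, hC2, hz2, hres2⟩ := hInv2'
    subst hrksz
    have hllab0 : lab.length = n.toNat := hllab
    have hlpar0 : par.length = n.toNat := hlpar
    have hwu : widx n.toNat (e.getD 0 0) < n.toNat := widx_lt n.toNat _ (by omega) (by omega)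
    have hwv : widx n.toNat (e.getD 1 0) < n.toNat := widx_lt n.toNat _ (by omega) (by omega)
    have hBru : PySem.List.pyGetD lab (e.getD 0 0) 0 =
        lab.getD (widx n.toNat (e.getD 0 0)) 0 := by
      rw [pyGetD_widx lab _ 0 (by omega) (by omega), hllab0]
    have hBdu : PySem.List.pyGetD par (e.getD 0 0) 0 =
        par.getD (widx n.toNat (e.getD 0 0)) 0 := by
      rw [pyGetD_widx par _ 0 (by omega) (by omega), hlpar0]
    have hBrv : PySem.List.pyGetD lab (e.getD 1 0) 0 =
        lab.getD (widx n.toNat (e.getD 1 0)) 0 := by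
      rw [pyGetD_widx lab _ 0 (by omega) (by omega), hllab0]
    have hBdv : PySem.List.pyGetD par (e.getD 1 0) 0 =
        par.getD (widx n.toNat (e.getD 1 0)) 0 := by
      rw [pyGetD_widx par _ 0 (by omega) (by omega), hlpar0]
    rw [loopA, loopB]
    simp only [hf1]
    simp only [hf2]
    simp only [hBru, hBdu, hBrv, hBdv]
    set ru := lab.getD (widx n.toNat (e.getD 0 0)) 0 with hrudef
    set du := par.getD (widx n.toNat (e.getD 0 0)) 0 with hdudef
    set rv := lab.getD (widx n.toNat (e.getD 1 0)) 0 with hrvdef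
    set dv := par.getD (widx n.toNat (e.getD 1 0)) 0 with hdvdef
    obtain ⟨g1, hgle1, hg1⟩ := hres2 (widx n.toNat (e.getD 0 0)) hwu
    obtain ⟨g2, hgle2, hg2⟩ := hres2 (widx n.toNat (e.getD 1 0)) hwv
    obtain ⟨⟨hru0, hrun⟩, hruroot, hduB⟩ :=
      resolve_out n.toNat p2 q2 hlp2 hC2 g1 _ ru du (by omega) (by omega) hg1
    obtain ⟨⟨hrv0, hrvn⟩, hrvroot, hdvB⟩ :=
      resolve_out n.toNat p2 q2 hlp2 hC2 g2 _ rv dv (by omega) (by omega) hg2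
    have hsetpu : PySem.List.pySetD p2 ru rv = p2.set ru.toNat rv := by
      rw [pySetD_widx p2 ru rv (by omega) (by omega), hlp2, widx_nonneg _ _ hru0]
    have hsetpv : PySem.List.pySetD p2 rv ru = p2.set rv.toNat ru := by
      rw [pySetD_widx p2 rv ru (by omega) (by omega), hlp2, widx_nonneg _ _ hrv0]
    have hsetqu : ∀ x : Int, PySem.List.pySetD q2 ru x = q2.set ru.toNat x := by
      intro x
      rw [pySetD_widx q2 ru x (by omega) (by omega), hlq2, widx_nonneg _ _ hru0]
    have hsetqv : ∀ x : Int, PySem.List.pySetD q2 rv x = q2.set rv.toNat x := by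
      intro x
      rw [pySetD_widx q2 rv x (by omega) (by omega), hlq2, widx_nonneg _ _ hrv0]
    split_ifs with hne hlt hmod
    · dsimp only
      rw [hsetpu, hsetqu _, show du + dv + e.getD 2 0 = dv + du + e.getD 2 0 from by ring]
      exact ih _ _ _ _ _ _ (c+1)
        (inv_union n p2 q2 rk lab par rk _ _ rv ru (PySem.Int.mod (dv + du + e.getD 2 0) 2)
          hInv2 ⟨hrv0, hrvn⟩ ⟨hru0, hrun⟩ hrvroot hruroot (fun he => hne he.symm)
          ⟨mod2_lb _, mod2_ub _⟩ ⟨widx n.toNat (e.getD 1 0), hwv, rfl⟩ rfl)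
        hpre2
    · dsimp only
      rw [hsetpv, hsetqv _]
      exact ih _ _ _ _ _ _ (c+1)
        (inv_union n p2 q2 rk lab par rk _ _ ru rv (PySem.Int.mod (du + dv + e.getD 2 0) 2)
          hInv2 ⟨hru0, hrun⟩ ⟨hrv0, hrvn⟩ hruroot hrvroot hne
          ⟨mod2_lb _, mod2_ub _⟩ ⟨widx n.toNat (e.getD 0 0), hwu, rfl⟩ rfl)
        hpre2
    · exact ih p2 q2 rk lab par rk (c+1) hInv2 hpre2
    · exact ih p2 q2 rk lab par rk c hInv2 hpre2

lemma inv_init (n : Int) :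
    InvAB n (PySem.List.pyRange 0 n 1) (List.replicate n.toNat 0) (List.replicate n.toNat 1)
      (PySem.List.pyRange 0 n 1) (List.replicate n.toNat 0) (List.replicate n.toNat 1) := by
  have hlr : (PySem.List.pyRange 0 n 1).length = n.toNat := by
    rw [PySem.List.length_pyRange_one]; omega
  have hget : ∀ k, k < n.toNat → (PySem.List.pyRange 0 n 1).getD k 0 = (k:Int) := by
    intro k hk
    rw [List.getD_eq_getElem _ _ (by omega), PySem.List.getElem_pyRange_one]
    ring
  refine ⟨hlr, by simp, hlr, by simp, rfl, ?_, ?_, ?_⟩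
  · intro x hx
    rw [PySem.List.mem_pyRange_one] at hx
    omega
  · intro k hk _
    rw [List.getD_eq_getElem _ _ (by simp; omega)]
    simp
  · intro k hk
    refine ⟨1, ?_, ?_⟩
    · rw [Nat.one_le_iff_ne_zero]
      intro hzero
      rw [List.countP_eq_zero] at hzero
      apply hzero ((PySem.List.pyRange 0 n 1).getD k 0)
      · rw [List.getD_eq_getElem _ _ (by omega)]; exact List.getElem_mem _
      · simp
    · rw [resolve, if_pos (by simp only [PySem.List.pyGetD_natCast]; exact hget k hk)]
      rw [hget k hk]
      have hrep : (List.replicate n.toNat (0:Int)).getD k 0 = 0 := by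
        rw [List.getD_eq_getElem _ _ (by simp; omega)]; simp
      rw [hrep]

-- ===== VERDICT (by name: the statement is the Claim_ definition above) =====
theorem numberOfEdgesAdded_spec : Claim_equal_numberOfEdgesAdded := by
  intro n edges _ hpre
  unfold Spec_numberOfEdgesAdded numberOfEdgesAdded numberOfEdgesAdded_alt
  exact loop_eq n edges _ _ _ _ _ _ 0 (inv_init n) hpre
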